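-- pv_equiv track=rewrite | github.com/Zer0Hiro/Python-Practice | EXAMS/2022B.py | cntMaxSub
-- ===== SOURCE A (Python) =====
-- def rec_prefix(s,pref):
--     if len(pref) == 0 or len(s) == 0:
--         return 0
--     if pref[0] == s[0]:
--         return  1 + rec_prefix(s[1:], pref[1:])
--     else:
--         return 0
--
-- def cntMaxSub(s,sub):
--     temp = 0
--     count = 0
--     for i in range(len(s)):
--         temp = rec_prefix(s[i:],sub)
--         if temp > count:
--             count = temp
--     return count
-- ===== SOURCE B (Python) =====
-- def cntMaxSub(s, sub):
--     # Binary search on l: "sub[:l] occurs in s" is antitone in l,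
--     # so the answer is the largest l with sub[:l] in s.
--     lo, hi = 0, len(sub)
--     while lo < hi:
--         mid = (lo + hi + 1) // 2
--         if sub[:mid] in s:
--             lo = mid
--         else:
--             hi = mid - 1
--     return lo
-- ===== Notes on version B (the rewrite author's own statement) =====
-- stated objective: faster
-- what changed: Replaces A's scan over every start position with a recursive per-position match by a binary search for the largest l such that sub[:l] occurs in s (the occurrence predicate is antitone in l), using the C-level substring test.
import Mathlib
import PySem

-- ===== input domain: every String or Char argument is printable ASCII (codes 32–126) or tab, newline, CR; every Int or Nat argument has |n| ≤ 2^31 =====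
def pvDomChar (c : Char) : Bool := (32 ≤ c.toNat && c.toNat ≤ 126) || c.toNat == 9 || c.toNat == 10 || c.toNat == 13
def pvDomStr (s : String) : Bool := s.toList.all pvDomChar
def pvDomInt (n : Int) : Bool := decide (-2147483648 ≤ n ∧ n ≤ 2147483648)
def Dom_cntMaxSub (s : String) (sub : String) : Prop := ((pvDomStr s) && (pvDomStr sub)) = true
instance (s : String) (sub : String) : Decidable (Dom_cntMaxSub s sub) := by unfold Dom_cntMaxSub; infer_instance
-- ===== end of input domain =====

-- B replaces A's scan over all start positions (recomputing a match length at each)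
-- by a binary search for the largest l with sub[:l] occurring in s; objective: faster.

-- ===== PORT A =====
-- rec_prefix(s, pref): length of the common prefix, by structural recursion as in A
def recPrefix : List Char → List Char → Int
  | _, [] => 0
  | [], _ => 0
  | c :: cs, p :: ps => if p = c then 1 + recPrefix cs ps else 0

def cntMaxSub (s : String) (sub : String) : Int :=
  let t := s.toList
  (PySem.List.pyRange 0 (t.length : Int) 1).foldl
    (fun count i =>
      let temp := recPrefix (PySem.List.slice t (some i) none) sub.toList
      if temp > count then temp else count) 0

-- ===== PORT B =====
-- the while-loop of Source B: lo/hi binary search; sub[:mid] in s is PySem.Chars.isIn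
def altGo (t p : List Char) (lo hi : Nat) : Nat :=
  if h : lo < hi then
    let mid := (lo + hi + 1) / 2
    if PySem.Chars.isIn (p.take mid) t then altGo t p mid hi
    else altGo t p lo (mid - 1)
  else lo
termination_by hi - lo
decreasing_by all_goals omega

def cntMaxSub_alt (s : String) (sub : String) : Int :=
  (altGo s.toList sub.toList 0 sub.toList.length : Int)

-- ===== PRECONDITION & SPEC =====
def Spec_cntMaxSub (s : String) (sub : String) (out : Int) : Prop := out = cntMaxSub_alt s sub
instance (s : String) (sub : String) (out : Int) : Decidable (Spec_cntMaxSub s sub out) := by unfold Spec_cntMaxSub; infer_instance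

-- ===== CLAIM (what is proved, stated in full; the proofs are below) =====
def Claim_equal_cntMaxSub : Prop := ∀ (s : String) (sub : String), Dom_cntMaxSub s sub → Spec_cntMaxSub s sub (cntMaxSub s sub)

-- ===== LEMMAS AND PROOFS =====

-- Nat-valued version of recPrefix, for arithmetic reasoning
def cpN : List Char → List Char → Nat
  | _, [] => 0
  | [], _ => 0
  | c :: cs, p :: ps => if p = c then 1 + cpN cs ps else 0

theorem recPrefix_eq_cpN : ∀ (xs ys : List Char), recPrefix xs ys = (cpN xs ys : Int) := by
  intro xs ys
  induction xs generalizing ys with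
  | nil =>
    cases ys with
    | nil => simp [recPrefix, cpN]
    | cons p ps => simp [recPrefix, cpN]
  | cons c cs ih =>
    cases ys with
    | nil => simp [recPrefix, cpN]
    | cons p ps =>
      simp only [recPrefix, cpN, ih]
      split <;> push_cast <;> ring

theorem cpN_ge_iff : ∀ (xs ys : List Char) (l : Nat),
    l ≤ cpN xs ys ↔ (ys.take l <+: xs ∧ l ≤ ys.length) := by
  intro xs
  induction xs with
  | nil =>
    intro ys l
    cases l with
    | zero => simp
    | succ k =>
      cases ys with
      | nil => simp [cpN]
      | cons p ps => simp [cpN]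
  | cons c cs ih =>
    intro ys l
    cases l with
    | zero => simp
    | succ k =>
      cases ys with
      | nil => simp [cpN]
      | cons p ps =>
        simp only [cpN, List.take_succ_cons, List.cons_prefix_cons, List.length_cons]
        by_cases hpc : p = c
        · subst hpc
          rw [if_pos rfl]
          constructor
          · intro h
            have := (ih ps k).mp (by omega)
            exact ⟨⟨rfl, this.1⟩, by omega⟩
          · rintro ⟨⟨-, hpre⟩, hlen⟩
            have := (ih ps k).mpr ⟨hpre, by omega⟩
            omega
        · simp only [if_neg hpc]
          constructor
          · intro h; omega
          · rintro ⟨⟨h, -⟩, -⟩; exact absurd h hpc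

theorem cpN_le_len (xs ys : List Char) : cpN xs ys ≤ ys.length :=
  ((cpN_ge_iff xs ys (cpN xs ys)).mp le_rfl).2

theorem take_cpN_prefix (xs ys : List Char) : ys.take (cpN xs ys) <+: xs :=
  ((cpN_ge_iff xs ys (cpN xs ys)).mp le_rfl).1

-- "sub[:l] in s" via drops
theorem take_infix_iff (u t : List Char) :
    u <:+: t ↔ ∃ i, i ≤ t.length ∧ u <+: t.drop i := by
  constructor
  · rintro ⟨pre, suf, rfl⟩
    refine ⟨pre.length, by simp, ?_⟩
    rw [List.append_assoc, List.drop_left]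
    exact ⟨suf, rfl⟩
  · rintro ⟨i, -, hpre⟩
    exact hpre.isInfix.trans (List.drop_suffix i t).isInfix

-- antitone: a shorter prefix of sub occurs whenever a longer one does
theorem infix_take_mono {p t : List Char} {l l' : Nat} (h : l' ≤ l)
    (hl : p.take l <:+: t) : p.take l' <:+: t := by
  have : p.take l' <+: p.take l := by
    have h2 : p.take l' = (p.take l).take l' := by
      rw [List.take_take, Nat.min_eq_left h]
    rw [h2]
    exact List.take_prefix _ _
  exact this.isInfix.trans hl

theorem altGo_spec (t p : List Char) (lo hi : Nat) (hle : lo ≤ hi)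
    (hlo : PySem.Chars.isIn (p.take lo) t = true) :
    lo ≤ altGo t p lo hi ∧ altGo t p lo hi ≤ hi ∧
      PySem.Chars.isIn (p.take (altGo t p lo hi)) t = true ∧
      ∀ l, altGo t p lo hi < l → l ≤ hi → PySem.Chars.isIn (p.take l) t = false := by
  fun_induction altGo t p lo hi with
  | case1 lo hi h mid hin ih =>
    have hmid : mid = (lo + hi + 1) / 2 := rfl
    have hm1 : lo < mid := by omega
    have hm2 : mid ≤ hi := by omega
    obtain ⟨h1, h2, h3, h4⟩ := ih hm2 hin
    exact ⟨by omega, h2, h3, h4⟩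
  | case2 lo hi h mid hin ih =>
    have hmid : mid = (lo + hi + 1) / 2 := rfl
    have hm1 : lo ≤ mid - 1 := by omega
    have hm2 : mid ≤ hi := by omega
    obtain ⟨h1, h2, h3, h4⟩ := ih hm1 hlo
    refine ⟨h1, by omega, h3, ?_⟩
    intro l hgt hlehi
    by_cases hl : l ≤ mid - 1
    · exact h4 l hgt hl
    · -- mid ≤ l: antitone from ¬ isIn (p.take mid)
      rw [Bool.eq_false_iff]
      intro habs
      have : p.take mid <:+: t :=
        infix_take_mono (by omega) ((PySem.Chars.isIn_iff_infix _ _).mp habs)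
      rw [(PySem.Chars.isIn_iff_infix _ _).mpr this] at hin
      exact hin rfl
  | case3 lo hi h =>
    exact ⟨le_rfl, hle, hlo, fun l h1 h2 => by omega⟩

-- foldl max bounds (Int state)
theorem foldl_max_le {L : List Nat} {g : Nat → Int} {c0 B : Int}
    (h0 : c0 ≤ B) (h : ∀ i ∈ L, g i ≤ B) :
    L.foldl (fun c i => max c (g i)) c0 ≤ B := by
  induction L generalizing c0 with
  | nil => exact h0
  | cons x xs ih =>
    exact ih (max_le h0 (h x (by simp))) (fun i hi => h i (by simp [hi]))

theorem le_foldl_max {L : List Nat} {g : Nat → Int} {c0 : Int} :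
    c0 ≤ L.foldl (fun c i => max c (g i)) c0 := by
  induction L generalizing c0 with
  | nil => exact le_rfl
  | cons x xs ih => exact le_trans (le_max_left _ _) ih

theorem elem_le_foldl_max {L : List Nat} {g : Nat → Int} {c0 : Int} {i : Nat}
    (hi : i ∈ L) : g i ≤ L.foldl (fun c i => max c (g i)) c0 := by
  induction L generalizing c0 with
  | nil => cases hi
  | cons x xs ih =>
    rcases List.mem_cons.mp hi with rfl | hmem
    · exact le_trans (le_max_right _ _) le_foldl_max
    · exact ih hmem

-- A's port as a foldl max over List.range
theorem cntMaxSub_eq_foldl (s sub : String) :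
    cntMaxSub s sub =
      (List.range s.toList.length).foldl
        (fun c i => max c ((cpN (s.toList.drop i) sub.toList : Nat) : Int)) 0 := by
  show (PySem.List.pyRange 0 ((s.toList.length : Nat) : Int) 1).foldl
      (fun count i =>
        let temp := recPrefix (PySem.List.slice s.toList (some i) none) sub.toList
        if temp > count then temp else count) 0 = _
  rw [PySem.List.pyRange_one]
  simp only [Int.sub_zero, Int.toNat_natCast, List.foldl_map, zero_add,
    PySem.List.slice_from_natCast, recPrefix_eq_cpN]
  congr 1
  funext c i
  rcases le_or_gt ((cpN (s.toList.drop i) sub.toList : Int)) c with h | h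
  · rw [if_neg (by omega), max_eq_left h]
  · rw [if_pos (by omega), max_eq_right (le_of_lt h)]

-- ===== VERDICT (by name: the statement is the Claim_ definition above) =====
theorem cntMaxSub_spec : Claim_equal_cntMaxSub := by
  intro s sub _
  unfold Spec_cntMaxSub cntMaxSub_alt
  rw [cntMaxSub_eq_foldl]
  set t := s.toList with ht
  set p := sub.toList with hp
  set r := altGo t p 0 p.length with hr
  obtain ⟨-, hrle, hrin, hrmax⟩ :=
    altGo_spec t p 0 p.length (Nat.zero_le _)
      ((PySem.Chars.isIn_iff_infix _ _).mpr (by simp))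
  have hub : ∀ i ∈ List.range t.length, ((cpN (t.drop i) p : Nat) : Int) ≤ (r : Int) := by
    intro i hi
    have hc_le_m : cpN (t.drop i) p ≤ p.length := cpN_le_len _ _
    by_contra hgt
    have hrc : r < cpN (t.drop i) p := by omega
    have : PySem.Chars.isIn (p.take (cpN (t.drop i) p)) t = false :=
      hrmax _ hrc hc_le_m
    rw [Bool.eq_false_iff] at this
    apply this
    rw [PySem.Chars.isIn_iff_infix]
    exact (take_infix_iff _ _).mpr
      ⟨i, by simp [List.mem_range] at hi; omega, take_cpN_prefix _ _⟩
  have hle : (List.range t.length).foldl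
      (fun c i => max c ((cpN (t.drop i) p : Nat) : Int)) 0 ≤ (r : Int) :=
    foldl_max_le (by positivity) hub
  have hge : (r : Int) ≤ (List.range t.length).foldl
      (fun c i => max c ((cpN (t.drop i) p : Nat) : Int)) 0 := by
    rcases Nat.eq_zero_or_pos r with hr0 | hr0
    · rw [hr0]; exact le_foldl_max
    · -- p.take r occurs in t at some position i < t.length
      obtain ⟨i, hi_le, hpre⟩ :=
        (take_infix_iff _ _).mp ((PySem.Chars.isIn_iff_infix _ _).mp hrin)
      have hlen_take : (p.take r).length = r := by
        rw [List.length_take]; omega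
      have hi_lt : i < t.length := by
        have := hpre.length_le
        rw [hlen_take, List.length_drop] at this
        omega
      have hcp : r ≤ cpN (t.drop i) p :=
        (cpN_ge_iff _ _ _).mpr ⟨hpre, hrle⟩
      calc (r : Int) ≤ ((cpN (t.drop i) p : Nat) : Int) := by exact_mod_cast hcp
        _ ≤ _ := elem_le_foldl_max (g := fun j => ((cpN (t.drop j) p : Nat) : Int)) (List.mem_range.mpr hi_lt)
  exact le_antisymm hle hge
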